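-- pv_equiv track=rewrite | github.com/CarlosIrineuCosta/boxiii | test_validation.py | validate_handle_characters
-- ===== SOURCE A (Python) =====
-- def validate_handle_characters(v: str) -> str:
--     """Platform handle validation logic from api_server.py"""
--     if not v or not v.strip():
--         raise ValueError("Platform handle cannot be empty")
--
--     forbidden_chars = [' ', '\t', '\n', '@', '#', '&', '?', '=', '+', '%']
--     for char in forbidden_chars:
--         if char in v:
--             raise ValueError(f"Platform handle '{v}' is invalid! Handles cannot contain spaces or special characters like: {', '.join(forbidden_chars)}")
--     return v.strip()
-- ===== SOURCE B (Python) =====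
-- def validate_handle_characters(v: str) -> str:
--     """Single pass over v's characters against a precomputed forbidden set."""
--     stripped = v.strip()
--     if not stripped:
--         raise ValueError("Platform handle cannot be empty")
--     forbidden = {' ', '\t', '\n', '@', '#', '&', '?', '=', '+', '%'}
--     forbidden_text = ', '.join([' ', '\t', '\n', '@', '#', '&', '?', '=', '+', '%'])
--     for ch in v:
--         if ch in forbidden:
--             raise ValueError(f"Platform handle '{v}' is invalid! Handles cannot contain spaces or special characters like: {forbidden_text}")
--     return stripped
-- ===== Notes on version B (the rewrite author's own statement) =====
-- stated objective: alternative
-- what changed: B strips once, then makes one pass over the characters of v testing each against a precomputed forbidden set, instead of A's loop over the ten forbidden characters each doing a substring scan of v.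
import Mathlib
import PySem

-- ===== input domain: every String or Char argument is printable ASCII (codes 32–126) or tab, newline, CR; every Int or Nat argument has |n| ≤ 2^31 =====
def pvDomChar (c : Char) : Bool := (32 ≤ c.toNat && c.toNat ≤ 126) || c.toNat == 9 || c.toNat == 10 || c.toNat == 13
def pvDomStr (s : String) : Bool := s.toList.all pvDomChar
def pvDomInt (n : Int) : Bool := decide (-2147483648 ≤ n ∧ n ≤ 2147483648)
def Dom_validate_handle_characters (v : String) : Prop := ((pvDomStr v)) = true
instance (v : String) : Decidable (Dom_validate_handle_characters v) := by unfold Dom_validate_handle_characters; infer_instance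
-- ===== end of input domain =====

-- B makes one pass over v's characters against a precomputed forbidden set instead of A's
-- ten substring scans of v; equivalence of the return value on inputs where A returns.

-- ===== PORT A =====
-- A's fixed forbidden list, in A's order
def pvForbiddenA : List Char := [' ', '\t', '\n', '@', '#', '&', '?', '=', '+', '%']

-- A raises ValueError on the guard and on a forbidden character; those branches return ""
-- here and are excluded by Pre_. 'char in v' for a single char is membership in v's chars (exact).
def validate_handle_characters (v : String) : String :=
  if v = "" ∨ PySem.Str.strip v = "" then ""
  else if pvForbiddenA.any (fun c => v.toList.contains c) then ""
  else PySem.Str.strip v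

-- ===== PORT B =====
-- B's precomputed forbidden set (Python set literal -> PySem.Set)
def pvForbiddenB : PySem.Set Char :=
  PySem.Set.ofList [' ', '\t', '\n', '@', '#', '&', '?', '=', '+', '%']

-- B's single scan of v's characters: true iff some character is forbidden (B raises there)
def pvAltScan : List Char → Bool
  | [] => false
  | c :: rest => if pvForbiddenB.contains c then true else pvAltScan rest

def validate_handle_characters_alt (v : String) : String :=
  let stripped := PySem.Str.strip v
  if stripped = "" then ""
  else if pvAltScan v.toList then ""
  else stripped

-- ===== PRECONDITION & SPEC =====
-- Pre_ excludes exactly the inputs where A raises ValueError: empty/whitespace-only handles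
-- and handles containing a forbidden character; A returns normally on everything else.
def Pre_validate_handle_characters (v : String) : Prop :=
  PySem.Str.strip v ≠ "" ∧ (v.toList.all (fun c => !pvForbiddenA.contains c)) = true

instance (v : String) : Decidable (Pre_validate_handle_characters v) := by
  unfold Pre_validate_handle_characters; infer_instance

def pvWitness_validate_handle_characters : String := "ab"

def Spec_validate_handle_characters (v : String) (out : String) : Prop :=
  out = validate_handle_characters_alt v
instance (v : String) (out : String) : Decidable (Spec_validate_handle_characters v out) := by
  unfold Spec_validate_handle_characters; infer_instance

-- ===== CLAIM (what is proved, stated in full; the proofs are below) =====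
def Claim_equal_validate_handle_characters : Prop :=
  ∀ (v : String), Dom_validate_handle_characters v → Pre_validate_handle_characters v →
    Spec_validate_handle_characters v (validate_handle_characters v)

-- ===== LEMMAS AND PROOFS =====

-- B's scan finds a forbidden character iff some character of the list is forbidden
theorem pvAltScan_eq_any (l : List Char) : pvAltScan l = l.any (fun c => pvForbiddenB.contains c) := by
  induction l with
  | nil => rfl
  | cons c rest ih =>
    unfold pvAltScan
    rw [List.any_cons]
    cases h : pvForbiddenB.contains c <;> simp [List.contains_eq_mem] at h <;> simp [h, ih]

-- ===== VERDICT (by name: the statement is the Claim_ definition above) =====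
theorem validate_handle_characters_spec : Claim_equal_validate_handle_characters := by
  intro v _ hpre
  obtain ⟨hstrip, hfree0⟩ := hpre
  have hfree : ∀ c ∈ v.toList, c ∉ pvForbiddenA := by
    simpa [List.all_eq_true, List.contains_eq_mem] using hfree0
  unfold Spec_validate_handle_characters validate_handle_characters validate_handle_characters_alt
  have hv : v ≠ "" := by
    intro h; subst h; exact hstrip rfl
  have hA : pvForbiddenA.any (fun c => v.toList.contains c) = false := by
    simp only [List.any_eq_false, List.contains_eq_mem, Bool.not_eq_true, decide_eq_false_iff_not]
    exact fun c hc hmem => hfree c hmem hc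
  have hBA : (pvForbiddenB : List Char) = pvForbiddenA := by decide
  have hB : pvAltScan v.toList = false := by
    rw [pvAltScan_eq_any]
    simp only [List.any_eq_false]
    intro c hc
    rw [hBA]
    simp only [PySem.Set.contains, List.contains_eq_mem, decide_eq_false_iff_not,
      Bool.not_eq_true]
    exact fun hmem => hfree c hc hmem
  simp [hv, hstrip, hB]
  exact fun c hc hmem => hfree c hmem hc
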